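-- pv_equiv track=rewrite | github.com/yashwarrdhangautam/Netra | netra/modules/vapt/waf_evasion.py | unicode_encode
-- ===== SOURCE A (Python) =====
-- def unicode_encode(payload: str) -> str:
--     """Unicode / overlong UTF-8 encoding for path traversal."""
--     replacements = {
--         "/": "%c0%af",
--         "\\": "%c1%9c",
--         ".": "%u002e",
--         "'": "%u0027",
--         '"': "%u0022",
--     }
--     result = payload
--     for char, encoded in replacements.items():
--         result = result.replace(char, encoded, 1)  # replace first occurrence
--     return result
-- ===== SOURCE B (Python) =====
-- def unicode_encode(payload: str) -> str:
--     """Unicode / overlong UTF-8 encoding for path traversal."""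
--     replacements = {
--         "/": "%c0%af",
--         "\\": "%c1%9c",
--         ".": "%u002e",
--         "'": "%u0027",
--         '"': "%u0022",
--     }
--     out = []
--     used = set()
--     for ch in payload:
--         if ch in replacements and ch not in used:
--             out.append(replacements[ch])
--             used.add(ch)
--         else:
--             out.append(ch)
--     return "".join(out)
-- ===== Notes on version B (the rewrite author's own statement) =====
-- stated objective: alternative
-- what changed: Single left-to-right pass with a used-set replaces A's five sequential full-string str.replace(...,1) scans; correct because the encodings contain no special characters.
import Mathlib
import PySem

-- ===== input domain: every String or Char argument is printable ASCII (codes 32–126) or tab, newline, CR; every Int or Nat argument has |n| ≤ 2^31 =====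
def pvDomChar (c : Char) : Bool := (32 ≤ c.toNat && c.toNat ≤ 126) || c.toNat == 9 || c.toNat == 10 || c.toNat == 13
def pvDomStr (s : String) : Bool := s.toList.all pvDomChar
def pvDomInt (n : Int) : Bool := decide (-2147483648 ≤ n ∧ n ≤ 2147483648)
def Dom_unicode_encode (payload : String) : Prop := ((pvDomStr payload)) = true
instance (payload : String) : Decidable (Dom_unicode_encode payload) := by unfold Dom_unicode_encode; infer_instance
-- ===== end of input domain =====

-- B replaces A's five sequential str.replace(..., 1) scans by one pass with a used-set (alternative decomposition, not claimed faster).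

-- ===== PORT A =====
-- s.replace(old, new, 1) for a single-character old: exact hand port (PySem has no count-limited replace)
def pvRepl1 (c : Char) (e : List Char) : List Char → List Char
  | [] => []
  | d :: ds => if d = c then e ++ ds else d :: pvRepl1 c e ds

-- the dict literal, in insertion order, as (char, encoding.toList) pairs
def pvReplacements : List (Char × List Char) :=
  [('/', ['%','c','0','%','a','f']),
   ('\\', ['%','c','1','%','9','c']),
   ('.', ['%','u','0','0','2','e']),
   ('\'', ['%','u','0','0','2','7']),
   ('"', ['%','u','0','0','2','2'])]

def unicode_encode (payload : String) : String :=
  String.ofList (pvReplacements.foldl (fun r p => pvRepl1 p.1 p.2 r) payload.toList)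

-- ===== PORT B =====
-- B's dict lookup 'replacements.get(ch)' as a function (fixed literal dict)
def pvEnc (c : Char) : Option (List Char) :=
  if c = '/' then some ['%','c','0','%','a','f']
  else if c = '\\' then some ['%','c','1','%','9','c']
  else if c = '.' then some ['%','u','0','0','2','e']
  else if c = '\'' then some ['%','u','0','0','2','7']
  else if c = '"' then some ['%','u','0','0','2','2']
  else none

-- one step of B's loop: state = (output chars so far, used-set)
def pvBStep (st : List Char × PySem.Set Char) (c : Char) : List Char × PySem.Set Char :=
  match pvEnc c with
  | some e => if PySem.Set.contains st.2 c then (st.1 ++ [c], st.2)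
              else (st.1 ++ e, PySem.Set.add st.2 c)
  | none => (st.1 ++ [c], st.2)

def unicode_encode_alt (payload : String) : String :=
  String.ofList ((payload.toList.foldl pvBStep ([], PySem.Set.empty)).1)

-- ===== PRECONDITION & SPEC =====
def Spec_unicode_encode (payload : String) (out : String) : Prop := out = unicode_encode_alt payload
instance (payload : String) (out : String) : Decidable (Spec_unicode_encode payload out) := by unfold Spec_unicode_encode; infer_instance

-- ===== CLAIM (what is proved, stated in full; the proofs are below) =====
def Claim_equal_unicode_encode : Prop := ∀ (payload : String), Dom_unicode_encode payload → Spec_unicode_encode payload (unicode_encode payload)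

-- ===== LEMMAS AND PROOFS =====

-- reference one-pass function: act c = "c is still to be replaced"
def pvOp (act : Char → Bool) : List Char → List Char
  | [] => []
  | d :: ds =>
    match pvEnc d with
    | some e => if act d then e ++ pvOp (Function.update act d false) ds
                else d :: pvOp act ds
    | none => d :: pvOp act ds

theorem pvOp_congr (act act' : Char → Bool)
    (h : ∀ c e, pvEnc c = some e → act c = act' c) (cs : List Char) :
    pvOp act cs = pvOp act' cs := by
  induction cs generalizing act act' with
  | nil => rfl
  | cons d ds ih =>
    cases he : pvEnc d with
    | none => simp only [pvOp, he]; rw [ih act act' h]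
    | some e =>
      have hupd : ∀ c e', pvEnc c = some e' →
          Function.update act d false c = Function.update act' d false c := by
        intro c e' hce
        by_cases hc : c = d
        · subst hc; simp [Function.update_self]
        · rw [Function.update_of_ne hc, Function.update_of_ne hc, h c e' hce]
      simp only [pvOp, he]
      rw [h d e he]
      by_cases hd : act' d
      · rw [if_pos hd, if_pos hd, ih _ _ hupd]
      · rw [if_neg hd, if_neg hd, ih act act' h]

theorem pvOp_bot (cs : List Char) : pvOp (fun _ => false) cs = cs := by
  induction cs with
  | nil => rfl
  | cons d ds ih => cases he : pvEnc d <;> simp [pvOp, he, ih]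

-- special chars never occur inside any encoding
theorem pvEnc_not_mem (c d : Char) (ec e : List Char)
    (hc : pvEnc c = some ec) (hd : pvEnc d = some e) : c ∉ e := by
  unfold pvEnc at hc hd
  split_ifs at hc hd
  all_goals (injection hd with hd; subst hd; subst_vars; decide)

theorem pvRepl1_append (c : Char) (e l r : List Char) (h : c ∉ l) :
    pvRepl1 c e (l ++ r) = l ++ pvRepl1 c e r := by
  induction l with
  | nil => rfl
  | cons d ds ih =>
    simp only [List.cons_append, pvRepl1]
    have hdc : d ≠ c := fun hh => h (by simp [hh])
    rw [if_neg hdc, ih (fun hh => h (by simp [hh]))]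

-- key lemma: one more replace1 pass = enabling one more char in the one-pass function
theorem pvRepl1_pvOp (c : Char) (ec : List Char) (act : Char → Bool) (cs : List Char)
    (hc : pvEnc c = some ec) (ha : act c = false) :
    pvRepl1 c ec (pvOp act cs) = pvOp (Function.update act c true) cs := by
  induction cs generalizing act with
  | nil => rfl
  | cons d ds ih =>
    cases he : pvEnc d with
    | none =>
      have hdc : d ≠ c := fun hh => by rw [hh, hc] at he; cases he
      simp only [pvOp, he]
      simp only [pvRepl1]
      rw [if_neg hdc, ih act ha]
    | some e =>
      by_cases hd : act d
      · have hdc : d ≠ c := fun hh => by rw [hh, ha] at hd; cases hd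
        have hd' : Function.update act c true d = true := by
          rw [Function.update_of_ne hdc]; exact hd
        simp only [pvOp, he]
        rw [if_pos hd, if_pos hd']
        rw [pvRepl1_append c ec e _ (pvEnc_not_mem c d ec e hc he)]
        rw [ih (Function.update act d false)
          (by rw [Function.update_of_ne (Ne.symm hdc)]; exact ha)]
        rw [Function.update_comm hdc]
      · by_cases hdc : d = c
        · subst hdc
          have hd' : Function.update act d true d = true := Function.update_self ..
          simp only [pvOp, he]
          rw [if_neg hd, if_pos hd']
          have hupdd : Function.update (Function.update act d true) d false = act := by
            funext x
            by_cases hx : x = d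
            · subst hx; rw [Function.update_self, ha]
            · rw [Function.update_of_ne hx, Function.update_of_ne hx]
          rw [hupdd]
          have hee : ec = e := Option.some.inj (hc.symm.trans he)
          simp [pvRepl1, hee]
        · have hd' : Function.update act c true d = false := by
            rw [Function.update_of_ne hdc]; exact (Bool.not_eq_true _).mp hd
          simp only [pvOp, he]
          rw [if_neg hd, if_neg (by rw [hd']; exact Bool.false_ne_true)]
          simp only [pvRepl1]
          rw [if_neg hdc, ih act ha]

-- A's five passes, folded, equal pvOp with all five chars enabled
def pvActA : Char → Bool :=
  Function.update (Function.update (Function.update (Function.update (Function.update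
    (fun _ => false) '/' true) '\\' true) '.' true) '\'' true) '"' true

theorem pvA_eq_op (cs : List Char) :
    pvReplacements.foldl (fun r p => pvRepl1 p.1 p.2 r) cs = pvOp pvActA cs := by
  simp only [pvReplacements, List.foldl]
  conv_lhs => rw [← pvOp_bot cs]
  rw [pvRepl1_pvOp '/' _ _ cs (by decide) rfl]
  rw [pvRepl1_pvOp '\\' _ _ cs (by decide) (by decide)]
  rw [pvRepl1_pvOp '.' _ _ cs (by decide) (by decide)]
  rw [pvRepl1_pvOp '\'' _ _ cs (by decide) (by decide)]
  rw [pvRepl1_pvOp '"' _ _ cs (by decide) (by decide)]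
  rfl

theorem pv_contains_false {used : PySem.Set Char} {c : Char} (h : c ∉ used) :
    PySem.Set.contains used c = false := by
  cases hh : PySem.Set.contains used c
  · rfl
  · exact absurd ((PySem.Set.contains_iff _ _).mp hh) h

-- B's fold, with arbitrary accumulated output and used-set, equals pvOp
theorem pvB_eq_op (cs : List Char) (acc : List Char) (used : PySem.Set Char) :
    (cs.foldl pvBStep (acc, used)).1 = acc ++ pvOp (fun c => !(PySem.Set.contains used c)) cs := by
  induction cs generalizing acc used with
  | nil => simp [pvOp]
  | cons d ds ih =>
    simp only [List.foldl_cons]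
    cases he : pvEnc d with
    | none =>
      have hb : pvBStep (acc, used) d = (acc ++ [d], used) := by
        simp only [pvBStep, he]
      rw [hb, ih]
      simp only [pvOp, he, List.append_assoc, List.singleton_append]
    | some e =>
      by_cases hu : PySem.Set.contains used d
      · have hb : pvBStep (acc, used) d = (acc ++ [d], used) := by
          simp only [pvBStep, he]; rw [if_pos hu]
        rw [hb, ih]
        have hop : pvOp (fun c => !(PySem.Set.contains used c)) (d :: ds)
            = d :: pvOp (fun c => !(PySem.Set.contains used c)) ds := by
          simp only [pvOp, he]
          rw [if_neg (by rw [hu]; exact fun hh => Bool.false_ne_true (by simpa using hh))]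
        rw [hop, List.append_assoc, List.singleton_append]
      · have hnm : d ∉ used := fun h => hu ((PySem.Set.contains_iff _ _).mpr h)
        have hb : pvBStep (acc, used) d = (acc ++ e, PySem.Set.add used d) := by
          simp only [pvBStep, he]; rw [if_neg hu]
        rw [hb, ih]
        have hstep : pvOp (fun c => !(PySem.Set.contains used c)) (d :: ds)
            = e ++ pvOp (Function.update (fun c => !(PySem.Set.contains used c)) d false) ds := by
          simp only [pvOp, he]
          rw [if_pos (by rw [pv_contains_false hnm]; rfl)]
        rw [hstep, ← List.append_assoc]
        congr 1
        apply pvOp_congr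
        intro c e' _
        by_cases hcd : c = d
        · subst hcd
          rw [Function.update_self]
          have hmem : c ∈ PySem.Set.add used c := (PySem.Set.mem_add _ _ _).mpr (Or.inr rfl)
          rw [(PySem.Set.contains_iff _ _).mpr hmem]
          rfl
        · rw [Function.update_of_ne hcd]
          congr 1
          by_cases hm : c ∈ used
          · rw [(PySem.Set.contains_iff _ _).mpr hm,
              (PySem.Set.contains_iff _ _).mpr ((PySem.Set.mem_add _ _ _).mpr (Or.inl hm))]
          · rw [pv_contains_false hm, pv_contains_false (fun hh =>
              ((PySem.Set.mem_add _ _ _).mp hh).elim (fun h' => hm h') (fun h' => hcd h'))]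

-- ===== VERDICT (by name: the statement is the Claim_ definition above) =====
theorem unicode_encode_spec : Claim_equal_unicode_encode := by
  intro payload _
  unfold Spec_unicode_encode unicode_encode unicode_encode_alt
  rw [pvA_eq_op, pvB_eq_op]
  simp only [List.nil_append]
  congr 1
  apply pvOp_congr
  intro c e hce
  have hemp : PySem.Set.contains (PySem.Set.empty : PySem.Set Char) c = false :=
    pv_contains_false (by simp [PySem.Set.empty])
  rw [hemp]
  unfold pvActA
  unfold pvEnc at hce
  split_ifs at hce <;> subst_vars <;> decide
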